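-- pv_equiv track=rewrite | github.com/teamnxtone-stack/NXT1 | backend/services/deps_service.py | _find_package_json
-- ===== SOURCE A (Python) =====
-- from typing import Dict, List, Optional, Tuple
--
-- def _find_package_json(files: List[Dict[str, str]]) -> Optional[Tuple[int, Dict[str, str]]]:
--     """Find the FIRST root or near-root package.json. Prefers a root one to a
--     nested workspace one so we mutate the canonical project manifest.
--     """
--     candidates: List[Tuple[int, int, Dict[str, str]]] = []
--     for i, f in enumerate(files or []):
--         p = (f.get("path") or "").strip().lstrip("/")
--         if p == "package.json" or p.endswith("/package.json"):
--             depth = p.count("/")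
--             candidates.append((depth, i, f))
--     if not candidates:
--         return None
--     candidates.sort()
--     _, idx, f = candidates[0]
--     return idx, f
-- ===== SOURCE B (Python) =====
-- from typing import Dict, List, Optional, Tuple
--
-- def _find_package_json(files: List[Dict[str, str]]) -> Optional[Tuple[int, Dict[str, str]]]:
--     """Single argmin pass: keep the first candidate of strictly smallest depth
--     instead of collecting all candidates and sorting."""
--     best = None  # (depth, index, file)
--     for i, f in enumerate(files or []):
--         p = (f.get("path") or "").strip().lstrip("/")
--         if p == "package.json" or p.endswith("/package.json"):
--             depth = p.count("/")
--             if best is None or depth < best[0]: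
--                 best = (depth, i, f)
--     if best is None:
--         return None
--     return best[1], best[2]
-- ===== Notes on version B (the rewrite author's own statement) =====
-- stated objective: simpler
-- what changed: Replaces collect-all-candidates-then-sort-then-take-first with a single running-argmin pass that keeps the first candidate of strictly smallest depth.
import Mathlib
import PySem

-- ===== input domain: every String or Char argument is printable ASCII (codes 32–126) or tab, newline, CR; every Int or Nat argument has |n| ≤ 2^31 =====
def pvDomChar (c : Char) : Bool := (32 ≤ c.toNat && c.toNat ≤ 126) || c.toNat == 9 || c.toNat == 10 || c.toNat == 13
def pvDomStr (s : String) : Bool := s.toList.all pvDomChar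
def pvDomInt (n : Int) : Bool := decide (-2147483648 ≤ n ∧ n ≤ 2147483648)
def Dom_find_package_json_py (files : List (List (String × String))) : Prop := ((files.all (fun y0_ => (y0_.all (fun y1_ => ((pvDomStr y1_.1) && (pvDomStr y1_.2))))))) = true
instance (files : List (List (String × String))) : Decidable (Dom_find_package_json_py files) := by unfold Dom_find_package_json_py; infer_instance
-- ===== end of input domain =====

-- B replaces A's collect-then-sort with a single running-argmin pass (objective: simpler).

-- shared helpers: both Pythons compute p = (f.get("path") or "").strip().lstrip("/") and the same match test
-- f.get("path") or "" : first-match lookup, missing key or empty string gives "" (getD "" is exact here)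
-- lstrip("/") removes exactly the leading '/' characters: dropWhile (· == '/') is exact
def pvNorm (f : List (String × String)) : List Char :=
  (PySem.Chars.strip ((f.lookup "path").getD "").toList).dropWhile (· == '/')

def pvIsPkg (p : List Char) : Bool :=
  decide (p = "package.json".toList) || PySem.Chars.endswith p "/package.json".toList

def pvDepth (p : List Char) : Int := (PySem.Chars.count p ['/'] : Int)

-- ===== PORT A =====
-- candidates.sort() compares the triples (depth, i, f) lexicographically; the indices i are pairwise
-- distinct, so the dict component is never compared: sorting by the tuple key (depth, index) is exact.
def find_package_json_py (files : List (List (String × String))) : Option (Int × (List (String × String))) :=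
  let cands : List (Int × Int × List (String × String)) :=
    (PySem.List.enumerate files 0).foldl (fun acc e =>
      let p := pvNorm e.2
      if pvIsPkg p then acc ++ [(pvDepth p, e.1, e.2)] else acc) []
  match PySem.List.sorted2 cands (fun c => c.1) (fun c => c.2.1) with
  | [] => none
  | c :: _ => some (c.2.1, c.2.2)

-- ===== PORT B =====
def find_package_json_py_alt (files : List (List (String × String))) : Option (Int × (List (String × String))) :=
  let best :=
    (PySem.List.enumerate files 0).foldl (fun best e =>
      let p := pvNorm e.2
      if pvIsPkg p then
        match best with
        | none => some (pvDepth p, e.1, e.2)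
        | some b => if pvDepth p < b.1 then some (pvDepth p, e.1, e.2) else some b
      else best) none
  match best with
  | none => none
  | some b => some (b.2.1, b.2.2)

-- ===== PRECONDITION & SPEC =====
def Spec_find_package_json_py (files : List (List (String × String))) (out : Option (Int × (List (String × String)))) : Prop := out = find_package_json_py_alt files
instance (files : List (List (String × String))) (out : Option (Int × (List (String × String)))) : Decidable (Spec_find_package_json_py files out) := by unfold Spec_find_package_json_py; infer_instance

-- ===== CLAIM (what is proved, stated in full; the proofs are below) =====
def Claim_equal_find_package_json_py : Prop := ∀ (files : List (List (String × String))), Dom_find_package_json_py files → Spec_find_package_json_py files (find_package_json_py files)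

-- ===== LEMMAS AND PROOFS =====

-- the comparison Python's tuple sort uses on (depth, i, f), restricted to (depth, i) (f is never reached)
def pvBefore : (Int × Int × List (String × String)) → (Int × Int × List (String × String)) → Bool :=
  fun a b => decide (a.1 < b.1) || (!decide (b.1 < a.1) && decide (a.2.1 < b.2.1))

def pvQ : Int × List (String × String) → Bool := fun e => pvIsPkg (pvNorm e.2)

def pvG : Int × List (String × String) → Int × Int × List (String × String) :=
  fun e => (pvDepth (pvNorm e.2), e.1, e.2)

def pvOutA (L : List (Int × Int × List (String × String))) : Option (Int × (List (String × String))) :=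
  match L with | [] => none | c :: _ => some (c.2.1, c.2.2)

def pvOutB (O : Option (Int × Int × List (String × String))) : Option (Int × (List (String × String))) :=
  match O with | none => none | some b => some (b.2.1, b.2.2)

def pvBStep : Option (Int × Int × List (String × String)) → Int × List (String × String) →
    Option (Int × Int × List (String × String)) :=
  fun best e =>
    if pvQ e then
      match best with
      | none => some (pvG e)
      | some b => if (pvG e).1 < b.1 then some (pvG e) else some b
    else best

lemma pv_A_eq (files : List (List (String × String))) :
    find_package_json_py files
      = pvOutA (PySem.List.sorted2
          ((PySem.List.enumerate files 0).foldl
            (fun acc e => if pvQ e then acc ++ [pvG e] else acc) [])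
          (fun c => c.1) (fun c => c.2.1)) := rfl

lemma pv_B_eq (files : List (List (String × String))) :
    find_package_json_py_alt files
      = pvOutB ((PySem.List.enumerate files 0).foldl pvBStep none) := rfl

lemma pv_sorted2_eq_foldl (cands : List (Int × Int × List (String × String))) :
    PySem.List.sorted2 cands (fun c => c.1) (fun c => c.2.1)
      = cands.foldl (fun acc x => PySem.List.insertBy pvBefore x acc) [] := rfl

lemma pv_insertBy_head? (before : (Int × Int × List (String × String)) → (Int × Int × List (String × String)) → Bool)
    (x : Int × Int × List (String × String)) (ys : List (Int × Int × List (String × String))) :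
    (PySem.List.insertBy before x ys).head?
      = some (match ys with | [] => x | y :: _ => if before x y then x else y) := by
  cases ys with
  | nil => simp [PySem.List.insertBy]
  | cons y t =>
    simp only [PySem.List.insertBy]
    split <;> simp_all

-- the loop invariant: the head of A's incrementally insertion-sorted candidate list is B's running best
lemma pv_loop (xs : List (List (String × String))) (k : Int)
    (sacc : List (Int × Int × List (String × String)))
    (h : ∀ y ∈ sacc, y.2.1 < k) :
    ((PySem.List.enumerate xs k).foldl
        (fun acc e => if pvQ e then PySem.List.insertBy pvBefore (pvG e) acc else acc) sacc).head?
      = (PySem.List.enumerate xs k).foldl pvBStep sacc.head? := by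
  induction xs generalizing k sacc with
  | nil => simp [PySem.List.enumerate]
  | cons f fs ih =>
    rw [PySem.List.enumerate_cons]
    simp only [List.foldl_cons]
    by_cases hq : pvQ (k, f) = true
    · have hmem : ∀ y ∈ PySem.List.insertBy pvBefore (pvG (k, f)) sacc, y.2.1 < k + 1 := by
        intro y hy
        rcases (PySem.List.insertBy_mem_iff _ _ _ _).1 hy with hy | hy
        · subst hy; simp [pvG]
        · have := h y hy; omega
      have hinit : (PySem.List.insertBy pvBefore (pvG (k, f)) sacc).head?
          = pvBStep sacc.head? (k, f) := by
        rw [pv_insertBy_head?]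
        cases hsacc : sacc with
        | nil => simp [pvBStep, hq]
        | cons b t =>
          have hb : b.2.1 < k := h b (by simp [hsacc])
          have hlt : ((pvG (k, f)).2.1 < b.2.1) = False := by
            have hk : (pvG (k, f)).2.1 = k := rfl
            rw [hk, eq_iff_iff, iff_false]; omega
          simp only [pvBStep, hq, if_true, List.head?_cons, pvBefore, hlt, decide_false,
            Bool.and_false, Bool.or_false]
          by_cases hd : (pvG (k, f)).1 < b.1 <;> simp [hd]
      rw [if_pos hq, ih (k + 1) _ hmem, hinit]
    · rw [if_neg hq]
      have hstep : pvBStep sacc.head? (k, f) = sacc.head? := by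
        simp [pvBStep, hq]
      rw [hstep]
      exact ih (k + 1) sacc (fun y hy => by have := h y hy; omega)

lemma pv_finish (L : List (Int × Int × List (String × String)))
    (O : Option (Int × Int × List (String × String))) (H : L.head? = O) :
    pvOutA L = pvOutB O := by
  cases L with
  | nil =>
    simp only [List.head?_nil] at H
    rw [← H]; rfl
  | cons c t =>
    simp only [List.head?_cons] at H
    rw [← H]; rfl

-- ===== VERDICT (by name: the statement is the Claim_ definition above) =====
theorem find_package_json_py_spec : Claim_equal_find_package_json_py := by
  intro files _
  show find_package_json_py files = find_package_json_py_alt files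
  rw [pv_A_eq, pv_B_eq]
  apply pv_finish
  rw [pv_sorted2_eq_foldl, PySem.List.foldl_append_if pvQ pvG, List.nil_append,
    List.foldl_map, List.foldl_filter]
  have H3 := pv_loop files 0 [] (by simp)
  simp only [List.head?_nil] at H3
  exact H3
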